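-- pv_equiv track=rewrite | github.com/MVicherkova/bc-projekt | functions.py | get_layer_info
-- ===== SOURCE A (Python) =====
-- from collections import OrderedDict
--
-- def get_layer_info(netlist):
--     layer_components = OrderedDict()
--     ipms = OrderedDict()
--     for key, item in netlist.items():
--         if item['layer'] in layer_components:
--             layer_components[item['layer']].append(key)
--         else:
--             layer_components[item['layer']] = [key]
--         if item['layer'] not in ipms:
--             ipms[item['layer']] = item['unused_nodes_in_layer']
--     return layer_components, ipms
-- ===== SOURCE B (Python) =====
-- from collections import OrderedDict
--
-- def get_layer_info(netlist):
--     # Selection-grouping: repeatedly peel off the whole leading layer.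
--     # Take the first remaining item's layer, collect every key of that layer in
--     # one scan, record that first item's unused-node count for the layer, drop
--     # the layer's items and repeat on what is left.  Layers emerge in
--     # first-seen order, so the two OrderedDicts built at the end match A's.
--     lc_pairs = []
--     ip_pairs = []
--     rest = list(netlist.items())
--     while rest:
--         key0, item0 = rest[0]
--         layer = item0['layer']
--         lc_pairs.append((layer, [k for k, it in rest if it['layer'] == layer]))
--         ip_pairs.append((layer, item0['unused_nodes_in_layer']))
--         rest = [(k, it) for k, it in rest if it['layer'] != layer]
--     return OrderedDict(lc_pairs), OrderedDict(ip_pairs)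
-- ===== Notes on version B (the rewrite author's own statement) =====
-- stated objective: alternative
-- what changed: B replaces A's single fold that maintains two parallel dicts with a selection-grouping loop: repeatedly take the first remaining item's layer, collect that whole layer's keys and its first item's unused-node value in one scan, remove the layer and repeat, building the two dicts from the finished pair lists.
import Mathlib
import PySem

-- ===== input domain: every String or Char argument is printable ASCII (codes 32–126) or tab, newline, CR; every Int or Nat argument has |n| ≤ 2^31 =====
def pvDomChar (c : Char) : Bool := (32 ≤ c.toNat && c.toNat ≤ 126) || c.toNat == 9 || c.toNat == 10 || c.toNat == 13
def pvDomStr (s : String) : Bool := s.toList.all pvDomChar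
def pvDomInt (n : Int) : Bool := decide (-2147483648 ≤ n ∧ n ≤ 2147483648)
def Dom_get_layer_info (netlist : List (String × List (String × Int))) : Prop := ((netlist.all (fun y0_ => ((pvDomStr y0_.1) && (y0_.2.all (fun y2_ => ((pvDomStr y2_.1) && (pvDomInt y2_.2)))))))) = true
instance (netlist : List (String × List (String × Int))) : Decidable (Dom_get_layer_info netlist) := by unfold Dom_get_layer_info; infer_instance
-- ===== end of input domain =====

-- B changes the algorithm: A's one fold maintaining two parallel dicts becomes selection-grouping,
-- repeatedly peeling off the whole leading layer in one scan; equivalence is about return values.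

-- ===== PORT A =====
-- item['k']: dict lookup; KeyError (key absent) is excluded by Pre_, so the 0 default is never used there.
def pvItemGet (item : List (String × Int)) (k : String) : Int :=
  (PySem.Dict.mk item).getD k 0

-- the body of A's single loop, over the pair state (layer_components, ipms)
def pvStepA (st : PySem.Dict Int (List String) × PySem.Dict Int Int)
    (kv : String × List (String × Int)) :
    PySem.Dict Int (List String) × PySem.Dict Int Int :=
  (let layer := pvItemGet kv.2 "layer"
   if st.1.contains layer then st.1.insert layer (st.1.getD layer [] ++ [kv.1])
   else st.1.insert layer [kv.1],
   let layer := pvItemGet kv.2 "layer"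
   if st.2.contains layer then st.2
   else st.2.insert layer (pvItemGet kv.2 "unused_nodes_in_layer"))

def get_layer_info (netlist : List (String × List (String × Int))) : (List (Int × List String)) × (List (Int × Int)) :=
  let st := netlist.foldl pvStepA (PySem.Dict.empty, PySem.Dict.empty)
  (st.1.items, st.2.items)

-- ===== PORT B =====
-- termination of B's while loop: dropping the head's whole layer strictly shrinks the list
lemma pv_filter_lt {α : Type} (kv : α) (tl : List α) (f : α → Int) :
    ((kv :: tl).filter (fun p => f p != f kv)).length < (kv :: tl).length := by
  rw [List.filter_cons, if_neg (by simp)]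
  exact Nat.lt_succ_of_le (List.length_filter_le _ _)

-- B's while loop: peel off the leading layer, appending one pair to each accumulator list
def pvPeel (rest : List (String × List (String × Int)))
    (lcAcc : List (Int × List String)) (ipAcc : List (Int × Int)) :
    (List (Int × List String)) × (List (Int × Int)) :=
  match rest with
  | [] => (lcAcc, ipAcc)
  | kv :: tl =>
    let layer := pvItemGet kv.2 "layer"
    pvPeel ((kv :: tl).filter (fun p => pvItemGet p.2 "layer" != layer))
      (lcAcc ++ [(layer, ((kv :: tl).filter (fun p => pvItemGet p.2 "layer" == layer)).map Prod.fst)])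
      (ipAcc ++ [(layer, pvItemGet kv.2 "unused_nodes_in_layer")])
termination_by rest.length
decreasing_by
  exact pv_filter_lt kv tl (fun p => pvItemGet p.2 "layer")

def get_layer_info_alt (netlist : List (String × List (String × Int))) : (List (Int × List String)) × (List (Int × Int)) :=
  let pairs := pvPeel netlist [] []
  ((PySem.Dict.empty.update pairs.1).items, (PySem.Dict.empty.update pairs.2).items)

-- ===== PRECONDITION & SPEC =====
-- Pre_ excludes items lacking the 'layer' or 'unused_nodes_in_layer' key, on which A raises KeyError;
-- it is conservative: A happens not to read 'unused_nodes_in_layer' on an item that is not the first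
-- of its layer, so it still returns on a few excluded inputs, where B returns the same value.
def Pre_get_layer_info (netlist : List (String × List (String × Int))) : Prop :=
  ∀ p ∈ netlist, "layer" ∈ p.2.map Prod.fst ∧ "unused_nodes_in_layer" ∈ p.2.map Prod.fst
instance (netlist : List (String × List (String × Int))) : Decidable (Pre_get_layer_info netlist) := by unfold Pre_get_layer_info; infer_instance

def pvWitness_get_layer_info : (List (String × List (String × Int))) :=
  [("R1", [("layer", 1), ("unused_nodes_in_layer", 2)]),
   ("R2", [("layer", 1), ("unused_nodes_in_layer", 2)]),
   ("C1", [("layer", 0), ("unused_nodes_in_layer", 0)])]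

def Spec_get_layer_info (netlist : List (String × List (String × Int))) (out : (List (Int × List String)) × (List (Int × Int))) : Prop := out = get_layer_info_alt netlist
instance (netlist : List (String × List (String × Int))) (out : (List (Int × List String)) × (List (Int × Int))) : Decidable (Spec_get_layer_info netlist out) := by unfold Spec_get_layer_info; infer_instance

-- ===== CLAIM (what is proved, stated in full; the proofs are below) =====
def Claim_equal_get_layer_info : Prop := ∀ (netlist : List (String × List (String × Int))), Dom_get_layer_info netlist → Pre_get_layer_info netlist → Spec_get_layer_info netlist (get_layer_info netlist)

-- ===== LEMMAS AND PROOFS =====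

-- the layer of one netlist entry
def pvLayer (p : String × List (String × Int)) : Int := pvItemGet p.2 "layer"

-- keys of the entries of xs with layer ℓ, in order
def pvCollect (xs : List (String × List (String × Int))) (ℓ : Int) : List String :=
  (xs.filter (fun p => pvItemGet p.2 "layer" == ℓ)).map Prod.fst

-- pure (non-accumulator) form of B's loop
def pvGo (rest : List (String × List (String × Int))) :
    (List (Int × List String)) × (List (Int × Int)) :=
  match rest with
  | [] => ([], [])
  | kv :: tl =>
    ((pvLayer kv, pvCollect (kv :: tl) (pvLayer kv)) ::
       (pvGo ((kv :: tl).filter (fun p => pvLayer p != pvLayer kv))).1,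
     (pvLayer kv, pvItemGet kv.2 "unused_nodes_in_layer") ::
       (pvGo ((kv :: tl).filter (fun p => pvLayer p != pvLayer kv))).2)
termination_by rest.length
decreasing_by
  all_goals exact pv_filter_lt kv tl pvLayer

lemma pvPeel_eq_pvGo (n : Nat) : ∀ (rest : List (String × List (String × Int))),
    rest.length ≤ n → ∀ lcAcc ipAcc,
    pvPeel rest lcAcc ipAcc = (lcAcc ++ (pvGo rest).1, ipAcc ++ (pvGo rest).2) := by
  induction n with
  | zero =>
    intro rest h lc ip
    have : rest = [] := List.eq_nil_of_length_eq_zero (Nat.le_zero.1 h)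
    subst this; simp [pvPeel, pvGo]
  | succ n ih =>
    intro rest h lc ip
    match rest with
    | [] => simp [pvPeel, pvGo]
    | kv :: tl =>
      have hlt : ((kv :: tl).filter (fun p => pvItemGet p.2 "layer" != pvItemGet kv.2 "layer")).length ≤ n := by
        have := pv_filter_lt kv tl (fun p => pvItemGet p.2 "layer")
        simp only [List.length_cons] at this h
        omega
      simp only [pvPeel, pvGo]
      rw [ih _ hlt]
      simp [pvLayer, pvCollect, List.append_assoc]

lemma pvGo_keys_subset (n : Nat) : ∀ (rest : List (String × List (String × Int))),
    rest.length ≤ n → ∀ (k : Int),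
    k ∈ ((pvGo rest).1.map Prod.fst) → ∃ p ∈ rest, pvLayer p = k := by
  induction n with
  | zero =>
    intro rest h k hk
    have : rest = [] := List.eq_nil_of_length_eq_zero (Nat.le_zero.1 h)
    subst this; simp [pvGo] at hk
  | succ n ih =>
    intro rest h k hk
    match rest with
    | [] => simp [pvGo] at hk
    | kv :: tl =>
      have hlt : ((kv :: tl).filter (fun p => pvLayer p != pvLayer kv)).length ≤ n := by
        have := pv_filter_lt kv tl pvLayer
        simp only [List.length_cons] at this h
        omega
      rw [pvGo] at hk
      simp only [List.map_cons, List.mem_cons] at hk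
      rcases hk with hk | hk
      · exact ⟨kv, List.mem_cons_self, hk.symm⟩
      · obtain ⟨p, hp, hpl⟩ := ih _ hlt k hk
        exact ⟨p, (List.mem_filter.1 hp).1, hpl⟩

lemma pvGo_keys_eq (n : Nat) : ∀ (rest : List (String × List (String × Int))),
    rest.length ≤ n →
    (pvGo rest).2.map Prod.fst = (pvGo rest).1.map Prod.fst := by
  induction n with
  | zero =>
    intro rest h
    have : rest = [] := List.eq_nil_of_length_eq_zero (Nat.le_zero.1 h)
    subst this; simp [pvGo]
  | succ n ih =>
    intro rest h
    match rest with
    | [] => simp [pvGo]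
    | kv :: tl =>
      have hlt : ((kv :: tl).filter (fun p => pvLayer p != pvLayer kv)).length ≤ n := by
        have := pv_filter_lt kv tl pvLayer
        simp only [List.length_cons] at this h
        omega
      rw [pvGo]
      simp only [List.map_cons]
      rw [ih _ hlt]

lemma pvGo_keys_nodup (n : Nat) : ∀ (rest : List (String × List (String × Int))),
    rest.length ≤ n → ((pvGo rest).1.map Prod.fst).Nodup := by
  induction n with
  | zero =>
    intro rest h
    have : rest = [] := List.eq_nil_of_length_eq_zero (Nat.le_zero.1 h)
    subst this; simp [pvGo]
  | succ n ih =>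
    intro rest h
    match rest with
    | [] => simp [pvGo]
    | kv :: tl =>
      have hlt : ((kv :: tl).filter (fun p => pvLayer p != pvLayer kv)).length ≤ n := by
        have := pv_filter_lt kv tl pvLayer
        simp only [List.length_cons] at this h
        omega
      rw [pvGo]
      simp only [List.map_cons, List.nodup_cons]
      refine ⟨fun hmem => ?_, ih _ hlt⟩
      obtain ⟨p, hp, hpl⟩ := pvGo_keys_subset n _ hlt _ hmem
      have := (List.mem_filter.1 hp).2
      rw [hpl] at this
      simp at this

-- building an OrderedDict from pairs with distinct keys just records the pair list
lemma pv_update_items {ν : Type} (pairs : List (Int × ν)) (hnd : (pairs.map Prod.fst).Nodup) :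
    ((PySem.Dict.empty : PySem.Dict Int ν).update pairs).items = pairs := by
  show (pairs.foldl (fun d p => d.insert p.1 p.2) PySem.Dict.empty).items = pairs
  have h1 := PySem.Dict.items_foldl_insert_fresh (l := pairs) (d := (PySem.Dict.empty : PySem.Dict Int ν))
    (k := Prod.fst) (v := Prod.snd) (by intro a _; rfl) hnd
  simpa using h1

-- the main invariant: A's fold from (d, i) appends future same-layer keys into d's groups
-- and then emits pvGo of the not-yet-seen layers
lemma pvA_inv (xs : List (String × List (String × Int)))
    (d : PySem.Dict Int (List String)) (i : PySem.Dict Int Int)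
    (hk : i.keys = d.keys) (hnd : d.keys.Nodup) :
    (xs.foldl pvStepA (d, i)).1.items
      = d.items.map (fun p => (p.1, p.2 ++ pvCollect xs p.1))
        ++ (pvGo (xs.filter (fun p => !(d.contains (pvLayer p))))).1
    ∧ (xs.foldl pvStepA (d, i)).2.items
      = i.items ++ (pvGo (xs.filter (fun p => !(d.contains (pvLayer p))))).2 := by
  induction xs generalizing d i with
  | nil => simp [pvGo, pvCollect]
  | cons kv tl ih =>
    have hic : ∀ x, i.contains x = d.contains x := by
      intro x
      rw [PySem.Dict.contains_eq_decide_mem_keys, PySem.Dict.contains_eq_decide_mem_keys, hk]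
    by_cases hc : d.contains (pvLayer kv)
    · -- existing layer: d's entry grows, i unchanged, kv dropped by the filter
      have hi2 : i.contains (pvLayer kv) = true := by rw [hic]; exact hc
      have hstep : pvStepA (d, i) kv =
          (d.insert (pvLayer kv) (d.getD (pvLayer kv) [] ++ [kv.1]), i) := by
        unfold pvStepA
        simp only [pvLayer] at hc hi2 ⊢
        simp [hc, hi2]
      set d' := d.insert (pvLayer kv) (d.getD (pvLayer kv) [] ++ [kv.1]) with hd'
      have hk' : d'.keys = d.keys := PySem.Dict.keys_insert_of_contains _ _ hc
      have hnd' : d'.keys.Nodup := by rw [hk']; exact hnd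
      have hcont' : ∀ x, d'.contains x = d.contains x := by
        intro x
        rw [PySem.Dict.contains_eq_decide_mem_keys, PySem.Dict.contains_eq_decide_mem_keys, hk']
      obtain ⟨ih1, ih2⟩ := ih d' i (hk.trans hk'.symm) hnd'
      have hfilter : (kv :: tl).filter (fun p => !(d.contains (pvLayer p)))
          = tl.filter (fun p => !(d'.contains (pvLayer p))) := by
        rw [List.filter_cons, if_neg (by simp [hc])]
        exact (List.filter_congr (fun p _ => by rw [hcont' (pvLayer p)])).symm
      constructor
      · rw [List.foldl_cons, hstep, ih1, hfilter]
        congr 1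
        rw [hd', PySem.Dict.items_insert_of_contains _ _ hc, List.map_map]
        apply List.map_congr_left
        intro q hq
        by_cases hq1 : q.1 = pvLayer kv
        · have hval : d.getD q.1 [] = q.2 := by
            have : (q.1, q.2) ∈ d.items := hq
            exact PySem.Dict.getD_of_mem_items _ this hnd _
          have hcol : pvCollect (kv :: tl) q.1 = kv.1 :: pvCollect tl q.1 := by
            unfold pvCollect
            rw [List.filter_cons, if_pos (by simp [hq1, pvLayer])]
            simp
          rw [hq1] at hval hcol ⊢
          simp only [Function.comp_apply]
          rw [← hq1] at hval hcol ⊢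
          simp [hval, hcol]
        · have hcol : pvCollect (kv :: tl) q.1 = pvCollect tl q.1 := by
            unfold pvCollect
            rw [List.filter_cons, if_neg (by simp; exact fun h => hq1 h.symm)]
          have hbeq : (q.1 == pvLayer kv) = false := by simp [hq1]
          simp [Function.comp, hbeq, hcol]
      · rw [List.foldl_cons, hstep, ih2, hfilter]
    · -- new layer: both dicts gain an appended entry; kv heads the filtered list
      have hc' : d.contains (pvLayer kv) = false := by simpa using hc
      have hic' : i.contains (pvLayer kv) = false := by rw [hic]; exact hc'
      have hstep : pvStepA (d, i) kv =
          (d.insert (pvLayer kv) [kv.1],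
           i.insert (pvLayer kv) (pvItemGet kv.2 "unused_nodes_in_layer")) := by
        unfold pvStepA
        simp only [pvLayer] at hc' hic' ⊢
        simp [hc', hic']
      set d' := d.insert (pvLayer kv) [kv.1] with hd'
      set i' := i.insert (pvLayer kv) (pvItemGet kv.2 "unused_nodes_in_layer") with hi'
      have hk'd : d'.keys = d.keys ++ [pvLayer kv] :=
        PySem.Dict.keys_insert_of_not_contains _ _ hc'
      have hk'i : i'.keys = i.keys ++ [pvLayer kv] :=
        PySem.Dict.keys_insert_of_not_contains _ _ hic'
      have hk' : i'.keys = d'.keys := by rw [hk'd, hk'i, hk]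
      have hnotmem : pvLayer kv ∉ d.keys := by
        rw [← PySem.Dict.contains_iff_mem_keys]; simp [hc']
      have hnd' : d'.keys.Nodup := by
        rw [hk'd]
        exact List.Nodup.append hnd (List.nodup_singleton _)
          (by intro a ha hb; simp at hb; subst hb; exact hnotmem ha)
      obtain ⟨ih1, ih2⟩ := ih d' i' hk' hnd'
      have hcont' : ∀ x, d'.contains x = (d.contains x || x == pvLayer kv) := by
        intro x
        rw [PySem.Dict.contains_eq_decide_mem_keys, PySem.Dict.contains_eq_decide_mem_keys, hk'd]
        simp only [List.mem_append, List.mem_singleton]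
        by_cases h : x ∈ d.keys <;> by_cases h2 : x = pvLayer kv <;> simp [h, h2]
      -- the filtered tail for d' drops exactly layer kv's items from the filtered tail for d
      have hfsplit : tl.filter (fun p => !(d'.contains (pvLayer p)))
          = (tl.filter (fun p => !(d.contains (pvLayer p)))).filter
              (fun p => pvLayer p != pvLayer kv) := by
        rw [List.filter_filter]
        apply List.filter_congr
        intro p _
        rw [hcont' (pvLayer p)]
        by_cases h1 : d.contains (pvLayer p) <;> by_cases h2 : pvLayer p = pvLayer kv <;>
          simp [h1, h2, bne]
      have hffull : (kv :: tl).filter (fun p => !(d.contains (pvLayer p)))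
          = kv :: tl.filter (fun p => !(d.contains (pvLayer p))) := by
        rw [List.filter_cons, if_pos (by simp [hc'])]
      -- collecting layer kv's keys from the d-filtered tail = collecting them from tl
      have hcolf : pvCollect (tl.filter (fun p => !(d.contains (pvLayer p)))) (pvLayer kv)
          = pvCollect tl (pvLayer kv) := by
        unfold pvCollect
        rw [List.filter_filter]
        congr 1
        apply List.filter_congr
        intro p _
        by_cases h2 : pvItemGet p.2 "layer" = pvLayer kv
        · have : d.contains (pvLayer p) = false := by
            show d.contains (pvItemGet p.2 "layer") = false
            rw [h2]; exact hc'
          simp [h2, this]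
        · simp [h2]
      have hgo : pvGo ((kv :: tl).filter (fun p => !(d.contains (pvLayer p))))
          = ((pvLayer kv, kv.1 :: pvCollect tl (pvLayer kv))
              :: (pvGo (tl.filter (fun p => !(d'.contains (pvLayer p))))).1,
             (pvLayer kv, pvItemGet kv.2 "unused_nodes_in_layer")
              :: (pvGo (tl.filter (fun p => !(d'.contains (pvLayer p))))).2) := by
        rw [hffull, pvGo]
        have hcolhd : pvCollect (kv :: tl.filter (fun p => !(d.contains (pvLayer p)))) (pvLayer kv)
            = kv.1 :: pvCollect tl (pvLayer kv) := by
          have hcolf' := hcolf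
          unfold pvCollect at hcolf' ⊢
          rw [List.filter_cons, if_pos (by simp [pvLayer]), List.map_cons, hcolf']
        have hrest : (kv :: tl.filter (fun p => !(d.contains (pvLayer p)))).filter
              (fun p => pvLayer p != pvLayer kv)
            = tl.filter (fun p => !(d'.contains (pvLayer p))) := by
          rw [List.filter_cons, if_neg (by simp), hfsplit]
        rw [hcolhd, hrest]
      constructor
      · rw [List.foldl_cons, hstep, ih1, hgo]
        rw [hd', PySem.Dict.items_insert_of_not_contains _ _ hc', List.map_append]
        have hmapeq : (List.map (fun p => (p.1, p.2 ++ pvCollect tl p.1)) d.items)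
            = List.map (fun p => (p.1, p.2 ++ pvCollect (kv :: tl) p.1)) d.items := by
          apply List.map_congr_left
          intro q hq
          have hq1 : q.1 ≠ pvLayer kv := by
            intro h
            apply hnotmem
            rw [← h]
            exact PySem.Dict.mem_keys_of_mem_items _ hq
          have : pvCollect (kv :: tl) q.1 = pvCollect tl q.1 := by
            unfold pvCollect
            rw [List.filter_cons, if_neg (by simp; exact fun h => hq1 h.symm)]
          simp [this]
        rw [hmapeq]
        simp [pvCollect, pvLayer, List.filter_cons, List.append_assoc]
      · rw [List.foldl_cons, hstep, ih2, hgo]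
        rw [hi', PySem.Dict.items_insert_of_not_contains _ _ hic']
        simp

-- ===== VERDICT (by name: the statement is the Claim_ definition above) =====
theorem get_layer_info_spec : Claim_equal_get_layer_info := by
  intro netlist _ _
  unfold Spec_get_layer_info get_layer_info get_layer_info_alt
  have hfilter : netlist.filter
      (fun p => !((PySem.Dict.empty : PySem.Dict Int (List String)).contains (pvLayer p)))
      = netlist := List.filter_eq_self.2 (fun p _ => by rfl)
  obtain ⟨h1, h2⟩ := pvA_inv netlist PySem.Dict.empty PySem.Dict.empty rfl
    PySem.Dict.nodup_keys_empty
  rw [hfilter] at h1 h2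
  rw [pvPeel_eq_pvGo netlist.length netlist le_rfl]
  simp only [List.nil_append]
  have hnd1 := pvGo_keys_nodup netlist.length netlist le_rfl
  have hnd2 : ((pvGo netlist).2.map Prod.fst).Nodup := by
    rw [pvGo_keys_eq netlist.length netlist le_rfl]; exact hnd1
  rw [pv_update_items _ hnd1, pv_update_items _ hnd2]
  refine Prod.ext ?_ ?_
  · show (netlist.foldl pvStepA (PySem.Dict.empty, PySem.Dict.empty)).1.items = (pvGo netlist).1
    rw [h1]
    have he : (PySem.Dict.empty : PySem.Dict Int (List String)).items = [] := rfl
    rw [he]; simp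
  · show (netlist.foldl pvStepA (PySem.Dict.empty, PySem.Dict.empty)).2.items = (pvGo netlist).2
    rw [h2]
    have he : (PySem.Dict.empty : PySem.Dict Int Int).items = [] := rfl
    rw [he]; simp
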